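-- pv_equiv track=rewrite | github.com/cwgambla/Poker_Project | Evaluation.py | determineIsStraight
-- ===== SOURCE A (Python) =====
-- def determineIsStraight(hand):
--     myNewList = []
--
--     for x in range(len(hand)):
--
--         myNewList.append(convertFaceToNumber(hand[x][0]))
--
--     myNewList.sort()
--
--     for x in range(len(hand)-1):
--         if myNewList[x+1]-myNewList[x] != 1:
--             return False
--
--     myComparisonList = []
--     for x in range(len(hand)):
--         myComparisonList.append(x)
--     return True
--
-- def convertFaceToNumber(card):
--
--     if card == "Ace":
--         return 1
--     if card == "Deuce":
--         return 2
--     if card == "Three":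
--         return 3
--     if card == "Four":
--         return 4
--     if card == "Five":
--         return 5
--     if card == "Six":
--         return 6
--     if card == "Seven":
--         return 7
--     if card == "Eight":
--         return 8
--     if card == "Nine":
--         return 9
--     if card == "Ten":
--         return 10
--     if card == "Jack":
--         return 11
--     if card == "Queen":
--         return 12
--     if card == "King":
--         return 13
-- ===== SOURCE B (Python) =====
-- def convertFaceToNumber(card):
--     if card == "Ace":
--         return 1
--     if card == "Deuce":
--         return 2
--     if card == "Three":
--         return 3
--     if card == "Four":
--         return 4
--     if card == "Five":
--         return 5
--     if card == "Six":
--         return 6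
--     if card == "Seven":
--         return 7
--     if card == "Eight":
--         return 8
--     if card == "Nine":
--         return 9
--     if card == "Ten":
--         return 10
--     if card == "Jack":
--         return 11
--     if card == "Queen":
--         return 12
--     if card == "King":
--         return 13
--
-- def determineIsStraight(hand):
--     nums = [convertFaceToNumber(c[0]) for c in hand]
--     if len(nums) < 2:
--         return True
--     return len(set(nums)) == len(nums) and max(nums) - min(nums) == len(nums) - 1
-- ===== Notes on version B (the rewrite author's own statement) =====
-- stated objective: simpler
-- what changed: Replaces A's sort-then-scan-adjacent-differences (plus a dead comparison-list loop) by a sort-free distinctness + range-span check: values form a straight iff they are all distinct and max-min equals len-1.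
import Mathlib
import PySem

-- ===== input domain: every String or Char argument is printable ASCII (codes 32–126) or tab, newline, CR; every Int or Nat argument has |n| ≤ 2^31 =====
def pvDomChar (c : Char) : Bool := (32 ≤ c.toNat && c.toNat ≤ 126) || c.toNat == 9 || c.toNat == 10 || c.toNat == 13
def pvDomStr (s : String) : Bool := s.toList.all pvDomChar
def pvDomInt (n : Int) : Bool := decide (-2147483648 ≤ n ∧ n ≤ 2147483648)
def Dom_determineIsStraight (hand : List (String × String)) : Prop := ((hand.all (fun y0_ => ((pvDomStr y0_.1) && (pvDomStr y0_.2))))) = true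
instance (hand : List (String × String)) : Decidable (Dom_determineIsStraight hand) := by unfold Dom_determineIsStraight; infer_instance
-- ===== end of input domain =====

-- B replaces A's sort + adjacent-difference scan by a distinctness + (max-min = len-1) span check; objective: simpler.


-- ===== PORT A =====
-- convertFaceToNumber: Python returns None on an unknown face → Option Int.
def convertFaceToNumber (card : String) : Option Int :=
  if card = "Ace" then some 1
  else if card = "Deuce" then some 2
  else if card = "Three" then some 3
  else if card = "Four" then some 4
  else if card = "Five" then some 5
  else if card = "Six" then some 6
  else if card = "Seven" then some 7
  else if card = "Eight" then some 8
  else if card = "Nine" then some 9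
  else if card = "Ten" then some 10
  else if card = "Jack" then some 11
  else if card = "Queen" then some 12
  else if card = "King" then some 13
  else none

-- A's second loop: scan adjacent differences of the sorted list, early-return False on a gap ≠ 1.
def chkLoop : List Int → Bool
  | a :: b :: t => if b - a ≠ 1 then false else chkLoop (b :: t)
  | _ => true

-- `.getD 0` only fires outside Pre_ (a None in the list makes Python's sort raise TypeError when len ≥ 2).
def determineIsStraight (hand : List (String × String)) : Bool :=
  let myNewList := hand.map (fun c => (convertFaceToNumber c.1).getD 0)
  chkLoop (PySem.List.sorted myNewList (fun x => x) false)

-- ===== PORT B =====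
def determineIsStraight_alt (hand : List (String × String)) : Bool :=
  let nums := hand.map (fun c => (convertFaceToNumber c.1).getD 0)
  if nums.length < 2 then true
  else ((PySem.Set.ofList nums).length == nums.length)
       && ((PySem.List.max? nums (fun x => x)).getD 0 - (PySem.List.min? nums (fun x => x)).getD 0
            == (nums.length : Int) - 1)

-- ===== PRECONDITION & SPEC =====
-- Pre_ excludes exactly the inputs where A raises TypeError: a hand of ≥ 2 cards containing an
-- unknown face name, where convertFaceToNumber returns None and Python's sort cannot compare None.
def Pre_determineIsStraight (hand : List (String × String)) : Prop :=
  hand.length ≤ 1 ∨ ∀ c ∈ hand, c.1 ∈ (["Ace", "Deuce", "Three", "Four", "Five", "Six", "Seven",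
    "Eight", "Nine", "Ten", "Jack", "Queen", "King"] : List String)
instance (hand : List (String × String)) : Decidable (Pre_determineIsStraight hand) := by
  unfold Pre_determineIsStraight; infer_instance

def pvWitness_determineIsStraight : (List (String × String)) :=
  [("Ten", "Spades"), ("Jack", "Hearts"), ("Queen", "Clubs")]

def Spec_determineIsStraight (hand : List (String × String)) (out : Bool) : Prop := out = determineIsStraight_alt hand
instance (hand : List (String × String)) (out : Bool) : Decidable (Spec_determineIsStraight hand out) := by unfold Spec_determineIsStraight; infer_instance

-- ===== CLAIM (what is proved, stated in full; the proofs are below) =====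
def Claim_equal_determineIsStraight : Prop := ∀ (hand : List (String × String)), Dom_determineIsStraight hand → Pre_determineIsStraight hand → Spec_determineIsStraight hand (determineIsStraight hand)

-- ===== LEMMAS AND PROOFS =====

-- chkLoop says: every adjacent difference in the list is exactly 1.
lemma chk_iff (s : List Int) :
    chkLoop s = true ↔ ∀ i (h : i + 1 < s.length), s[i + 1] = s[i]'(by omega) + 1 := by
  induction s with
  | nil => simp [chkLoop]
  | cons a t ih =>
    cases t with
    | nil => simp [chkLoop]
    | cons b t' =>
      rw [chkLoop]
      by_cases hba : b - a = 1
      · rw [if_neg (by omega), ih]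
        constructor
        · intro h i hi
          cases i with
          | zero => simpa using by omega
          | succ j =>
            have := h j (by simp at hi ⊢; omega)
            simpa using this
        · intro h j hj
          have := h (j + 1) (by simp at hj ⊢; omega)
          simpa using this
      · rw [if_pos (by omega)]
        simp only [Bool.false_eq_true, false_iff]
        intro h
        have := h 0 (by simp)
        simp at this
        omega

-- under chkLoop, the list is the arithmetic progression starting at its head
lemma chk_arith (s : List Int) (hc : chkLoop s = true) :
    ∀ i (h : i < s.length), s[i] = s[0]'(by omega) + i := by
  intro i
  induction i with
  | zero => simp
  | succ j ih =>
    intro h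
    have := (chk_iff s).mp hc j (by omega)
    rw [this, ih (by omega)]
    push_cast; ring

-- |set(xs)| = |xs| iff xs has no duplicates
lemma setlen_iff (xs : List Int) : (PySem.Set.ofList xs).length = xs.length ↔ xs.Nodup := by
  constructor
  · intro h
    have hsub : (PySem.Set.ofList xs) ⊆ xs := fun x hx => (PySem.Set.mem_ofList xs x).mp hx
    have hsp : (PySem.Set.ofList xs).Subperm xs :=
      List.subperm_of_subset (PySem.Set.nodup_ofList xs) hsub
    have hperm := hsp.perm_of_length_le (by omega)
    exact hperm.nodup_iff.mp (PySem.Set.nodup_ofList xs)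
  · intro h; rw [PySem.Set.ofList_eq_self_of_nodup xs h]

-- the max of the list is the last element of its sorted version, the min the first
lemma max_eq_sorted_last (nums : List Int) (h : 0 < nums.length) :
    (PySem.List.max? nums (fun x => x)).getD 0 =
      (PySem.List.sorted nums (fun x => x) false)[nums.length - 1]'(by
        rw [PySem.List.length_sorted]; omega) := by
  have hne : nums ≠ [] := by intro h'; simp [h'] at h
  obtain ⟨m, hm⟩ : ∃ m, PySem.List.max? nums (fun x => x) = some m := by
    cases hmx : PySem.List.max? nums (fun x => x) with
    | none => exact absurd ((PySem.List.max?_eq_none_iff nums (fun x => x)).mp hmx) hne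
    | some m => exact ⟨m, rfl⟩
  have hmax := PySem.List.max?_isMax hm
  have hlen := PySem.List.length_sorted nums (fun x => x) false
  have hms : m ∈ PySem.List.sorted nums (fun x => x) false :=
    (PySem.List.mem_sorted _ _ _ _).mpr (PySem.List.max?_mem hm)
  obtain ⟨j, hj, hjm⟩ := List.mem_iff_getElem.mp hms
  rw [hlen] at hj
  have hmono := PySem.List.key_sorted_getElem_mono nums (fun x => x) (p := j) (q := nums.length - 1)
    (by omega) (by omega)
  have h1 := hmax _ ((PySem.List.mem_sorted _ _ _ _).mp
    (List.getElem_mem (by omega : nums.length - 1 < (PySem.List.sorted nums (fun x => x) false).length)))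
  simp only at hmono h1
  rw [hm]; simp only [Option.getD_some]
  omega

lemma min_eq_sorted_head (nums : List Int) (h : 0 < nums.length) :
    (PySem.List.min? nums (fun x => x)).getD 0 =
      (PySem.List.sorted nums (fun x => x) false)[0]'(by
        rw [PySem.List.length_sorted]; omega) := by
  have hne : nums ≠ [] := by intro h'; simp [h'] at h
  obtain ⟨m, hm⟩ : ∃ m, PySem.List.min? nums (fun x => x) = some m := by
    cases hmx : PySem.List.min? nums (fun x => x) with
    | none => exact absurd ((PySem.List.min?_eq_none_iff nums (fun x => x)).mp hmx) hne
    | some m => exact ⟨m, rfl⟩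
  have hmin := PySem.List.min?_isMin hm
  have hlen := PySem.List.length_sorted nums (fun x => x) false
  have hms : m ∈ PySem.List.sorted nums (fun x => x) false :=
    (PySem.List.mem_sorted _ _ _ _).mpr (PySem.List.min?_mem hm)
  obtain ⟨j, hj, hjm⟩ := List.mem_iff_getElem.mp hms
  have hmono := PySem.List.key_sorted_getElem_mono nums (fun x => x) (p := 0) (q := j)
    (by omega) (by omega)
  have h1 := hmin _ ((PySem.List.mem_sorted _ _ _ _).mp
    (List.getElem_mem (by omega : 0 < (PySem.List.sorted nums (fun x => x) false).length)))
  simp only at hmono h1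
  rw [hm]; simp only [Option.getD_some]
  omega

-- a strictly increasing Int list gains at least d between positions i and i+d
lemma gap_lb (s : List Int) (hp : ∀ p q (hq : q < s.length) (hpq : p < q), s[p]'(by omega) < s[q]) :
    ∀ i d (h : i + d < s.length), s[i]'(by omega) + d ≤ s[i + d] := by
  intro i d
  induction d with
  | zero => intro h; simp
  | succ e ih =>
    intro h
    have h1 := ih (by omega)
    have h2 := hp (i + e) (i + e + 1) (by omega) (by omega)
    have h3 : s[i + (e + 1)]'h = s[i + e + 1]'(by omega) := rfl
    push_cast
    rw [h3]
    omega

-- core equivalence on the value lists, for hands of at least two cards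
lemma core (nums : List Int) (h2 : 2 ≤ nums.length) :
    chkLoop (PySem.List.sorted nums (fun x => x) false) =
      (((PySem.Set.ofList nums).length == nums.length)
        && ((PySem.List.max? nums (fun x => x)).getD 0 - (PySem.List.min? nums (fun x => x)).getD 0
             == (nums.length : Int) - 1)) := by
  have hlen := PySem.List.length_sorted nums (fun x => x) false
  have hperm := PySem.List.sorted_perm nums (fun x => x) false
  have hpair := PySem.List.sorted_pairwise nums (fun x => x)
  have hmax := max_eq_sorted_last nums (by omega)
  have hmin := min_eq_sorted_head nums (by omega)
  obtain ⟨s, hs⟩ : ∃ s, PySem.List.sorted nums (fun x => x) false = s := ⟨_, rfl⟩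
  simp only [hs] at hlen hperm hpair hmax hmin ⊢
  rw [Bool.eq_iff_iff, Bool.and_eq_true, beq_iff_eq, beq_iff_eq, setlen_iff, hmax, hmin]
  have hn1 : nums.length - 1 < s.length := by omega
  constructor
  · intro hc
    have harith := chk_arith s hc
    have hstrict : ∀ p q (hq : q < s.length) (hpq : p < q), s[p]'(by omega) < s[q] := by
      intro p q hq hpq
      rw [harith p (by omega), harith q hq]
      omega
    have hnodup : s.Nodup := by
      rw [List.nodup_iff_getElem?_ne_getElem?]
      intro p q hpq hq
      rw [List.getElem?_eq_getElem (by omega), List.getElem?_eq_getElem hq]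
      exact fun hcon => absurd (Option.some_injective _ hcon) (ne_of_lt (hstrict p q hq hpq))
    refine ⟨hperm.nodup_iff.mp hnodup, ?_⟩
    rw [harith (nums.length - 1) hn1]
    have : ((nums.length - 1 : Nat) : Int) = (nums.length : Int) - 1 := by omega
    omega
  · rintro ⟨hnd, hspan⟩
    have hnodup : s.Nodup := hperm.nodup_iff.mpr hnd
    have hle : ∀ p q (hq : q < s.length) (hpq : p ≤ q), s[p]'(by omega) ≤ s[q] := by
      intro p q hq hpq
      rcases Nat.lt_or_ge p q with hlt | hge
      · exact List.pairwise_iff_getElem.mp hpair p q (by omega) hq hlt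
      · have hpq' : p = q := by omega
        subst hpq'; exact le_refl _
    have hstrict : ∀ p q (hq : q < s.length) (hpq : p < q), s[p]'(by omega) < s[q] := by
      intro p q hq hpq
      have h1 := hle p q hq (by omega)
      have h2 : s[p]'(by omega) ≠ s[q] := by
        intro hcon
        have := (List.Nodup.getElem_inj_iff hnodup).mp hcon
        omega
      omega
    rw [chk_iff]
    intro i hi
    have hlt := hstrict i (i + 1) hi (by omega)
    have hlow := gap_lb s hstrict 0 i (by omega)
    have hd : (i + 1) + (nums.length - 1 - (i + 1)) = nums.length - 1 := by omega
    have hhigh := gap_lb s hstrict (i + 1) (nums.length - 1 - (i + 1)) (by omega)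
    have hh2 : s[(i + 1) + (nums.length - 1 - (i + 1))]'(by omega) =
        s[nums.length - 1]'hn1 := by
      simp only [hd]
    rw [hh2] at hhigh
    have hcast : ((nums.length - 1 - (i + 1) : Nat) : Int) = (nums.length : Int) - 1 - (i + 1) := by
      omega
    rw [hcast] at hhigh
    simp only [Nat.zero_add] at hlow
    omega

-- ===== VERDICT (by name: the statement is the Claim_ definition above) =====
theorem determineIsStraight_spec : Claim_equal_determineIsStraight := by
  intro hand _ _
  unfold Spec_determineIsStraight determineIsStraight determineIsStraight_alt
  simp only
  set nums := hand.map (fun c => (convertFaceToNumber c.1).getD 0) with hn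
  by_cases h : nums.length < 2
  · rw [if_pos h]
    interval_cases hl : nums.length
    · rw [List.length_eq_zero_iff.mp hl]; rfl
    · obtain ⟨x, hx⟩ := List.length_eq_one_iff.mp hl
      rw [hx]; rfl
  · rw [if_neg h]
    exact core nums (by omega)
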